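-- pv_equiv track=rewrite | github.com/jaspreetdogra/coddy.tech | Python/Journey/05_Daily_Challenges/2025-10-02_anxious_desk_search.py | anxious_desk_search
-- ===== SOURCE A (Python) =====
-- def anxious_desk_search(desk_items, target_item):
--     """
--     Simulates anxious desk search by reversing the desk and finding the target item.
--
--     Parameters:
--     - desk_items (list of str): The items on the desk
--     - target_item (str): The item to search for
--
--     Returns:
--     - int: Index of target_item in reversed desk, or -1 if not found
--     """
--     # Step 1: Reverse desk_items manually (no reverse())
--     reversed_items = []
--     for i in range(len(desk_items) - 1, -1, -1):
--         reversed_items.append(desk_items[i])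
--
--     # Step 2: Search for target_item manually (no index())
--     for i in range(len(reversed_items)):
--         if reversed_items[i] == target_item:
--             return i
--
--     # If not found
--     return -1
-- ===== SOURCE B (Python) =====
-- def anxious_desk_search(desk_items, target_item):
--     """Single fused backward pass: no reversed copy is built."""
--     n = len(desk_items)
--     for i in range(n - 1, -1, -1):
--         if desk_items[i] == target_item:
--             return n - 1 - i
--     return -1
-- ===== Notes on version B (the rewrite author's own statement) =====
-- stated objective: simpler
-- what changed: B drops the intermediate reversed list entirely and does one fused backward scan over the original list, returning len-1-i at the first match from the end.
import Mathlib
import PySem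

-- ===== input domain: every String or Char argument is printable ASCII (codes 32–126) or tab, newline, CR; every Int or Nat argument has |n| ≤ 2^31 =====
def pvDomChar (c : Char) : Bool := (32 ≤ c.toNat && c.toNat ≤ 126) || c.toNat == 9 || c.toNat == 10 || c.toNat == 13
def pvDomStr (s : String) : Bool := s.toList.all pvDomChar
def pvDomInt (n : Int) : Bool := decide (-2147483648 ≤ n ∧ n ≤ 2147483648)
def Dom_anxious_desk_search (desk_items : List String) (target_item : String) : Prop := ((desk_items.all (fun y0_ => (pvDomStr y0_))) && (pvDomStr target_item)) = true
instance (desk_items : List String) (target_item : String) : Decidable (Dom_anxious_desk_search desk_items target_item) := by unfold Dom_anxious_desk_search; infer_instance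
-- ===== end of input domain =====

-- B replaces A's build-reversed-list-then-scan with one fused backward scan over the original list (objective: simpler).

-- ===== PORT A =====
-- step 1: reversed_items built by appending desk_items[i] for i in range(len-1, -1, -1)
def pvRevA (desk_items : List String) : List String :=
  (PySem.List.pyRange ((desk_items.length : Int) - 1) (-1) (-1)).foldl
    (fun acc i => acc ++ [PySem.List.pyGetD desk_items i ""]) []

-- step 2: linear search over the reversed list, returning the first matching index
def pvSearchA (rev : List String) (target_item : String) : List Int → Int
  | [] => -1
  | i :: rest =>
    if PySem.List.pyGetD rev i "" = target_item then i else pvSearchA rev target_item rest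

def anxious_desk_search (desk_items : List String) (target_item : String) : Int :=
  pvSearchA (pvRevA desk_items) target_item
    (PySem.List.pyRange 0 ((pvRevA desk_items).length : Int) 1)

-- ===== PORT B =====
-- fused backward scan: first i from len-1 down to 0 with desk_items[i] == target, return len-1-i
def pvSearchB (desk_items : List String) (target_item : String) : List Int → Int
  | [] => -1
  | i :: rest =>
    if PySem.List.pyGetD desk_items i "" = target_item then (desk_items.length : Int) - 1 - i
    else pvSearchB desk_items target_item rest

def anxious_desk_search_alt (desk_items : List String) (target_item : String) : Int :=
  pvSearchB desk_items target_item
    (PySem.List.pyRange ((desk_items.length : Int) - 1) (-1) (-1))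

-- ===== PRECONDITION & SPEC =====
def Spec_anxious_desk_search (desk_items : List String) (target_item : String) (out : Int) : Prop := out = anxious_desk_search_alt desk_items target_item
instance (desk_items : List String) (target_item : String) (out : Int) : Decidable (Spec_anxious_desk_search desk_items target_item out) := by unfold Spec_anxious_desk_search; infer_instance

-- ===== CLAIM (what is proved, stated in full; the proofs are below) =====
def Claim_equal_anxious_desk_search : Prop := ∀ (desk_items : List String) (target_item : String), Dom_anxious_desk_search desk_items target_item → Spec_anxious_desk_search desk_items target_item (anxious_desk_search desk_items target_item)

-- ===== LEMMAS AND PROOFS =====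

-- reading the reversed list at a Nat index k reads the original at length-1-k
theorem pvGet_reverse (d : List String) (k : Nat) (hk : k < d.length) :
    PySem.List.pyGetD d.reverse (k : Int) "" = d[d.length - 1 - k]'(by omega) := by
  have h1 : k < d.reverse.length := by simpa using hk
  rw [PySem.List.pyGetD_natCast, List.getD_eq_getElem?_getD,
      List.getElem?_eq_getElem h1, Option.getD_some, List.getElem_reverse]

-- reading the original list at the Int index length-1-k
theorem pvGet_back (d : List String) (k : Nat) (hk : k < d.length) :
    PySem.List.pyGetD d ((d.length : Int) - 1 - (k : Int)) "" = d[d.length - 1 - k]'(by omega) := by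
  have hc : (d.length : Int) - 1 - (k : Int) = ((d.length - 1 - k : Nat) : Int) := by omega
  have h1 : d.length - 1 - k < d.length := by omega
  rw [hc, PySem.List.pyGetD_natCast, List.getD_eq_getElem?_getD,
      List.getElem?_eq_getElem h1, Option.getD_some]

-- A's manually built list is the reverse of the input
theorem pvRevA_eq_reverse (d : List String) : pvRevA d = d.reverse := by
  unfold pvRevA
  rw [PySem.List.pyRange_neg_one, List.foldl_map,
      PySem.List.foldl_append_singleton_eq_map]
  have hn : (((d.length : Int) - 1) - (-1)).toNat = d.length := by omega
  rw [hn, List.nil_append]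
  apply List.ext_getElem
  · simp
  · intro k h1 h2
    have hk : k < d.length := by simpa using h2
    rw [List.getElem_map, List.getElem_range, pvGet_back d k hk, List.getElem_reverse]

-- the two scans agree when driven by the corresponding index lists
theorem pvSearch_agree (d : List String) (t : String) (ks : List Nat)
    (h : ∀ k ∈ ks, k < d.length) :
    pvSearchA d.reverse t (List.map (fun k : Nat => (k : Int)) ks)
      = pvSearchB d t (List.map (fun k : Nat => (d.length : Int) - 1 - (k : Int)) ks) := by
  induction ks with
  | nil => rfl
  | cons k rest ih =>
    have hk : k < d.length := h k (by simp)
    rw [List.map_cons, List.map_cons, pvSearchA, pvSearchB,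
        pvGet_reverse d k hk, pvGet_back d k hk]
    split_ifs with hcond
    · omega
    · exact ih (fun j hj => h j (by simp [hj]))

theorem ports_agree (d : List String) (t : String) :
    anxious_desk_search d t = anxious_desk_search_alt d t := by
  unfold anxious_desk_search anxious_desk_search_alt
  rw [pvRevA_eq_reverse]
  have h1 : PySem.List.pyRange 0 (d.reverse.length : Int) 1
      = List.map (fun k : Nat => (k : Int)) (List.range d.length) := by
    rw [PySem.List.pyRange_one]
    have hn : ((d.reverse.length : Int) - 0).toNat = d.length := by simp
    rw [hn]
    simp only [zero_add]
  have h2 : PySem.List.pyRange ((d.length : Int) - 1) (-1) (-1)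
      = List.map (fun k : Nat => (d.length : Int) - 1 - (k : Int)) (List.range d.length) := by
    rw [PySem.List.pyRange_neg_one]
    have hn2 : (((d.length : Int) - 1) - (-1)).toNat = d.length := by omega
    rw [hn2]
  rw [h1, h2]
  exact pvSearch_agree d t (List.range d.length) (fun k hk => List.mem_range.mp hk)

-- ===== VERDICT (by name: the statement is the Claim_ definition above) =====
theorem anxious_desk_search_spec : Claim_equal_anxious_desk_search := by
  intro d t _
  unfold Spec_anxious_desk_search
  exact ports_agree d t
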